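-- pv_equiv track=rewrite | github.com/RositaBell-try2chng/pyTestRegex | main.py | getSplArray
-- ===== SOURCE A (Python) =====
-- def getSplArray(arr):
--     '''
--         разбиваем домен по точкам, составляем лист из листов с возможными вариантами написания домена
--     '''
--     allArr = []
--     i = 0
--     for one in arr:
--         spl = one.split('.')
--         spl.reverse()
--         for i in range(len(spl)):
--             if (i > len(allArr) - 1):
--                 allArr.append([])
--             if (spl[i] not in allArr[i]):
--                 allArr[i].append(spl[i])
--     return allArr
-- ===== SOURCE B (Python) =====
-- def getSplArray(arr):
--     # column-major rewrite: split everything first, then build each level in one pass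
--     splits = [list(reversed(one.split('.'))) for one in arr]
--     maxlen = max(map(len, splits), default=0)
--     return [list(dict.fromkeys(s[k] for s in splits if k < len(s)))
--             for k in range(maxlen)]
-- ===== Notes on version B (the rewrite author's own statement) =====
-- stated objective: faster
-- what changed: A grows allArr row-by-row, guarding every append with a linear 'not in' scan of the growing level list; B splits all domains first, then builds each level independently column-major, collecting the k-th reversed component of every domain and deduping once with dict.fromkeys (hash-based).
import Mathlib
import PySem

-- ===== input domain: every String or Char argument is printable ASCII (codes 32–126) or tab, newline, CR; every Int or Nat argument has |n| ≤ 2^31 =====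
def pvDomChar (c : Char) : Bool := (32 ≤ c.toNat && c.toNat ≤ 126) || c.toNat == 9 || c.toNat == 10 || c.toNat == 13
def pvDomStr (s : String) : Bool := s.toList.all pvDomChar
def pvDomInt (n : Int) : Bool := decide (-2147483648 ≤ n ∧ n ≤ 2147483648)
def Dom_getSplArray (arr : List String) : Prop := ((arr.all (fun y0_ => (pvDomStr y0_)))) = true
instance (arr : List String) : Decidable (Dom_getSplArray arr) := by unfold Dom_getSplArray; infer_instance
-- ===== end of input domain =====

-- B rebuilds the levels column-major (split all domains first, then one dedup pass per level)
-- instead of A's row-major incremental growth of allArr; equivalence of the two traversal orders is proved.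


-- ===== PORT A =====
-- A-side helper: one iteration of 'for i in range(len(spl))'
-- ('i > len(allArr) - 1' on Python ints is 'len(allArr) <= i'; the getD defaults are
--  never used: i < spl.length in the range loop, and i < acc.length after the append)
def pvStepA (spl : List String) (acc : List (List String)) (i : Nat) : List (List String) :=
  let acc2 := if acc.length ≤ i then acc ++ [[]] else acc
  if spl.getD i "" ∈ acc2.getD i [] then acc2
  else acc2.set i (acc2.getD i [] ++ [spl.getD i ""])

-- A-side helper: the whole inner loop for one domain
def pvRowA (acc : List (List String)) (spl : List String) : List (List String) :=
  (List.range spl.length).foldl (pvStepA spl) acc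

def getSplArray (arr : List String) : List (List String) :=
  -- one.split('.') with the non-empty separator "." never raises: .getD [] is dead
  arr.foldl (fun allArr one => pvRowA allArr ((PySem.Str.split? one ".").getD []).reverse) []

-- ===== PORT B =====
def getSplArray_alt (arr : List String) : List (List String) :=
  let splits := arr.map (fun one => ((PySem.Str.split? one ".").getD []).reverse)
  let maxlen := (splits.map List.length).foldl max 0
  -- list(dict.fromkeys(...)) = first-occurrence dedup = PySem.List.dedup;
  -- 's[k] for s in splits if k < len(s)' = filterMap of the in-range lookup s[k]?
  (List.range maxlen).map (fun k => PySem.List.dedup (splits.filterMap (fun s => s[k]?)))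

-- ===== PRECONDITION & SPEC =====
def Spec_getSplArray (arr : List String) (out : List (List String)) : Prop := out = getSplArray_alt arr
instance (arr : List String) (out : List (List String)) : Decidable (Spec_getSplArray arr out) := by unfold Spec_getSplArray; infer_instance

-- ===== CLAIM (what is proved, stated in full; the proofs are below) =====
def Claim_equal_getSplArray : Prop := ∀ (arr : List String), Dom_getSplArray arr → Spec_getSplArray arr (getSplArray arr)

-- ===== LEMMAS AND PROOFS =====

-- abstract versions of the two traversals, over any DecidableEq type
def pvAddE {α : Type} [DecidableEq α] (a : List α) (x : α) : List α :=
  if x ∈ a then a else a ++ [x]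

-- A's inner loop, structurally: merge one row into the accumulated levels
def pvAddRow {α : Type} [DecidableEq α] : List (List α) → List α → List (List α)
  | acc, [] => acc
  | [], x :: xs => [x] :: pvAddRow [] xs
  | a :: as, x :: xs => pvAddE a x :: pvAddRow as xs

-- merge a list of whole columns into the accumulated levels
def pvMergeAll {α : Type} [DecidableEq α] : List (List α) → List (List α) → List (List α)
  | acc, [] => acc
  | [], c :: cs => c.foldl pvAddE [] :: pvMergeAll [] cs
  | a :: as, c :: cs => c.foldl pvAddE a :: pvMergeAll as cs

-- prepend a row elementwise onto a list of columns (zip_longest-style)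
def pvZipCons {α : Type} : List α → List (List α) → List (List α)
  | [], cs => cs
  | x :: xs, [] => [x] :: pvZipCons xs []
  | x :: xs, c :: cs => (x :: c) :: pvZipCons xs cs

def pvOptCons {α : Type} (o : Option α) (l : List α) : List α :=
  match o with | some x => x :: l | none => l

theorem pvStepA_cons (xs : List String) (x : String) (a : List String)
    (acc : List (List String)) (i : Nat) :
    pvStepA (x :: xs) (a :: acc) (i + 1) = a :: pvStepA xs acc i := by
  simp only [pvStepA, List.length_cons, Nat.add_le_add_iff_right, List.getD_cons_succ]
  split_ifs with h1 h2 h2 <;> simp_all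

theorem pvFoldl_stepA_succ (l : List Nat) (xs : List String) (x : String)
    (a : List String) (acc : List (List String)) :
    List.foldl (fun s i => pvStepA (x :: xs) s (i + 1)) (a :: acc) l
      = a :: List.foldl (pvStepA xs) acc l := by
  induction l generalizing acc with
  | nil => rfl
  | cons i l ih => simp only [List.foldl_cons, pvStepA_cons, ih]

theorem pvRowA_eq_addRow (spl : List String) (acc : List (List String)) :
    pvRowA acc spl = pvAddRow acc spl := by
  induction spl generalizing acc with
  | nil => rfl
  | cons x xs ih =>
    have h0 : pvStepA (x :: xs) acc 0
        = match acc with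
          | [] => [[x]]
          | a :: as => pvAddE a x :: as := by
      cases acc with
      | nil => simp [pvStepA]
      | cons a as => simp only [pvStepA]; split_ifs <;> simp_all [pvAddE]
    simp only [pvRowA, List.length_cons, List.range_succ_eq_map, List.foldl_cons,
      List.foldl_map, h0]
    cases acc with
    | nil =>
      rw [pvFoldl_stepA_succ]
      simp only [pvAddRow, List.cons.injEq, true_and]
      exact ih []
    | cons a as =>
      rw [pvFoldl_stepA_succ]
      simp only [pvAddRow, List.cons.injEq, true_and]
      exact ih as

theorem pvMergeAll_addRow {α : Type} [DecidableEq α] (r : List α)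
    (acc cs : List (List α)) :
    pvMergeAll (pvAddRow acc r) cs = pvMergeAll acc (pvZipCons r cs) := by
  induction r generalizing acc cs with
  | nil => rfl
  | cons x xs ih =>
    cases acc with
    | nil =>
      cases cs with
      | nil =>
        simp only [pvAddRow, pvZipCons, pvMergeAll, List.foldl_cons, List.foldl_nil]
        have := ih (acc := []) (cs := [])
        simp only [pvMergeAll] at this
        simp [pvAddE, this]
      | cons c cs' =>
        simp only [pvAddRow, pvZipCons, pvMergeAll, List.foldl_cons, List.cons.injEq]
        refine ⟨by simp [pvAddE], ih (acc := []) (cs := cs')⟩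
    | cons a as =>
      cases cs with
      | nil =>
        simp only [pvAddRow, pvZipCons, pvMergeAll, List.foldl_cons, List.foldl_nil,
          List.cons.injEq, true_and]
        have := ih (acc := as) (cs := [])
        simp only [pvMergeAll] at this
        exact this
      | cons c cs' =>
        simp only [pvAddRow, pvZipCons, pvMergeAll, List.foldl_cons, List.cons.injEq,
          true_and]
        exact ih (acc := as) (cs := cs')

theorem pvFoldl_addRow {α : Type} [DecidableEq α] (rows : List (List α))
    (acc : List (List α)) :
    rows.foldl pvAddRow acc = pvMergeAll acc (rows.foldr pvZipCons []) := by
  induction rows generalizing acc with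
  | nil => rfl
  | cons r rows ih =>
    simp only [List.foldl_cons, List.foldr_cons, ih, pvMergeAll_addRow]

theorem pvMergeAll_nil {α : Type} [DecidableEq α] (cs : List (List α)) :
    pvMergeAll [] cs = cs.map (fun c => c.foldl pvAddE []) := by
  induction cs with
  | nil => rfl
  | cons c cs ih => simp [pvMergeAll, ih]

theorem pvAddE_eq_setAdd (a : List String) (x : String) :
    pvAddE a x = PySem.Set.add a x := by
  simp [pvAddE, PySem.Set.add, PySem.Set.contains]

theorem pvFoldl_addE_eq_dedup (c : List String) :
    c.foldl pvAddE [] = PySem.List.dedup c := by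
  rw [PySem.List.dedup_eq_ofList, PySem.Set.ofList_eq_foldl]
  have : (pvAddE : List String → String → List String) = PySem.Set.add :=
    funext fun a => funext fun x => pvAddE_eq_setAdd a x
  rw [this]

def pvMaxLen {α : Type} (rows : List (List α)) : Nat :=
  (rows.map List.length).foldl max 0

theorem pvFoldl_max (l : List Nat) (a : Nat) :
    l.foldl max a = max a (l.foldl max 0) := by
  induction l generalizing a with
  | nil => simp
  | cons b l ih =>
    simp only [List.foldl_cons]
    rw [ih (max a b), ih (max 0 b)]
    omega

theorem pvMaxLen_cons {α : Type} (r : List α) (rows : List (List α)) :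
    pvMaxLen (r :: rows) = max r.length (pvMaxLen rows) := by
  simp only [pvMaxLen, List.map_cons, List.foldl_cons]
  rw [pvFoldl_max]
  omega

theorem pvCol_nil {α : Type} (rows : List (List α)) (k : Nat)
    (h : pvMaxLen rows ≤ k) : rows.filterMap (fun s => s[k]?) = [] := by
  induction rows with
  | nil => rfl
  | cons r rows ih =>
    rw [pvMaxLen_cons] at h
    have h1 : r.length ≤ k := by omega
    simp [List.getElem?_eq_none h1, ih (by omega)]

theorem pvZipCons_range {α : Type} (r : List α) (m : Nat) (col : Nat → List α)
    (h : ∀ k, m ≤ k → col k = []) :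
    pvZipCons r ((List.range m).map col)
      = (List.range (max r.length m)).map (fun k => pvOptCons r[k]? (col k)) := by
  induction r generalizing m col with
  | nil =>
    simp only [pvZipCons, List.length_nil, Nat.zero_max]
    apply List.map_congr_left
    intro k _
    simp [pvOptCons]
  | cons x xs ih =>
    cases m with
    | zero =>
      simp only [List.range_zero, List.map_nil, pvZipCons, List.length_cons, Nat.max_zero]
      rw [List.range_succ_eq_map]
      simp only [List.map_cons, List.map_map, List.cons.injEq]
      refine ⟨by simp [pvOptCons, h 0 (Nat.zero_le 0)], ?_⟩
      have := ih 0 (fun k => col (k + 1)) (fun k _ => h (k + 1) (Nat.zero_le _))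
      simp only [List.range_zero, List.map_nil, Nat.max_zero] at this
      rw [this]
      apply List.map_congr_left
      intro k hk
      simp [Function.comp, pvOptCons, h (k + 1) (Nat.zero_le _)]
    | succ m' =>
      have hmax : max (x :: xs).length (m' + 1) = max xs.length m' + 1 := by
        simp only [List.length_cons]; omega
      rw [hmax, List.range_succ_eq_map, List.range_succ_eq_map]
      simp only [List.map_cons, List.map_map, pvZipCons, List.cons.injEq]
      refine ⟨by simp [pvOptCons], ?_⟩
      have := ih m' (fun k => col (k + 1)) (fun k hk => h (k + 1) (by omega))
      rw [show (List.map (col ∘ Nat.succ) (List.range m'))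
            = (List.map (fun k => col (k + 1)) (List.range m')) from rfl, this]
      apply List.map_congr_left
      intro k hk
      simp [Function.comp, pvOptCons]

theorem pvCols_eq {α : Type} (rows : List (List α)) :
    (List.range (pvMaxLen rows)).map (fun k => rows.filterMap (fun s => s[k]?))
      = rows.foldr pvZipCons [] := by
  induction rows with
  | nil => simp [pvMaxLen]
  | cons r rows ih =>
    rw [List.foldr_cons, ← ih,
      pvZipCons_range r (pvMaxLen rows) _ (fun k hk => pvCol_nil rows k hk),
      pvMaxLen_cons]
    apply List.map_congr_left
    intro k _
    cases hr : r[k]? <;> simp [pvOptCons, hr]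

-- ===== VERDICT (by name: the statement is the Claim_ definition above) =====
theorem getSplArray_spec : Claim_equal_getSplArray := by
  intro arr _
  unfold Spec_getSplArray getSplArray getSplArray_alt
  rw [show (fun (allArr : List (List String)) one =>
        pvRowA allArr ((PySem.Str.split? one ".").getD []).reverse)
      = (fun allArr one =>
        pvAddRow allArr ((PySem.Str.split? one ".").getD []).reverse) from
      funext fun a => funext fun o => pvRowA_eq_addRow _ a]
  rw [← List.foldl_map (f := fun one => ((PySem.Str.split? one ".").getD []).reverse)
      (g := pvAddRow)]
  rw [pvFoldl_addRow, pvMergeAll_nil, ← pvCols_eq]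
  simp only [List.map_map, Function.comp_def, pvMaxLen]
  apply List.map_congr_left
  intro k _
  exact pvFoldl_addE_eq_dedup _
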